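-- pv_equiv track=rewrite | github.com/scv0317/sentence_tokenizer | sentence_tokenizer_ML/train.py | make_trigram
-- ===== SOURCE A (Python) =====
-- import copy
--
-- def make_trigram(sentences):
-- 	trigram_list = []
-- 	trigram = []
-- 	tmp_gram = []
-- 	label = []
-- 	for sentence in sentences:
-- 		tmp_split = sentence.split()
-- 		for i in range(len(tmp_split)):
-- 			tmp_gram.append(tmp_split[i])
-- 			if len(tmp_gram) == 3:
-- 				temp = copy.deepcopy(tmp_gram)
-- 				trigram.append(temp)
-- 				del tmp_gram[0]
-- 				if i == 0 :
-- 					label.append(1)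
-- 				else:
-- 					label.append(0)
-- 	for i in range(len(trigram)):
-- 		trigram_list.append(str(trigram[i][0])+" "+str(trigram[i][1])+" "+str(trigram[i][2])+" "+str(label[i]))
-- 	return trigram_list
-- ===== SOURCE B (Python) =====
-- def make_trigram(sentences):
--     # Pass 1: concatenate all words; record the flat index at which each
--     # non-empty sentence starts (prefix word counts) in a set.
--     words = []
--     starts = set()
--     for sentence in sentences:
--         ws = sentence.split()
--         if ws:
--             starts.add(len(words))
--         words.extend(ws)
--     # Pass 2: zip three shifted copies of the word list; the label of a
--     # trigram is 1 iff its last word sits at a sentence-start index.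
--     return [f"{a} {b} {c} {1 if k + 2 in starts else 0}"
--             for k, (a, b, c) in enumerate(zip(words, words[1:], words[2:]))]
-- ===== Notes on version B (the rewrite author's own statement) =====
-- stated objective: simpler
-- what changed: Replaces A's single interleaved loop with a mutable sliding 3-buffer (deepcopy, del tmp_gram[0]), a parallel label list tracking per-sentence enumerate positions, and a final re-indexing pass, by: (1) one pass that only concatenates words and records each sentence's starting flat index in a set of prefix word-counts, and (2) zipping three shifted copies of the word list, labelling a trigram 1 exactly when its last word's index is a sentence start; no window buffer or per-token label bookkeeping exists in B.
import Mathlib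
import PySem

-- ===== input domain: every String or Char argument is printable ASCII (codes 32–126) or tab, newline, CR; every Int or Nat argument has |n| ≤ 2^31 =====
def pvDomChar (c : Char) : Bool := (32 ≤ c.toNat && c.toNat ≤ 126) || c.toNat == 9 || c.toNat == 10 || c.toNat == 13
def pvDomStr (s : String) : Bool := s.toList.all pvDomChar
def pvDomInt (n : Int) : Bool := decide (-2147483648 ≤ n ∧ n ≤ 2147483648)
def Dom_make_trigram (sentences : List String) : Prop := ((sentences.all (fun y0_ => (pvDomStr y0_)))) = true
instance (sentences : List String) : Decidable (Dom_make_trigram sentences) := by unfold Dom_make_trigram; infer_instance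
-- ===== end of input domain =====

-- B drops A's sliding 3-buffer and per-token label list: it concatenates all words,
-- records sentence-start flat indices as prefix word counts in a set, and zips three
-- shifted copies of the word list (objective: simpler).

-- ===== PORT A =====
-- state: (trigram, tmp_gram, label)
def pvAStep (st : List (List String) × List String × List Int) (it : Int × String) :
    List (List String) × List String × List Int :=
  let buf' := st.2.1 ++ [it.2]
  if buf'.length == 3 then
    (st.1 ++ [buf'], buf'.drop 1, st.2.2 ++ [if it.1 == 0 then (1 : Int) else 0])
  else
    (st.1, buf', st.2.2)

def pvASent (st : List (List String) × List String × List Int) (sentence : String) :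
    List (List String) × List String × List Int :=
  (PySem.List.enumerate (PySem.Str.split₀ sentence)).foldl pvAStep st

def make_trigram (sentences : List String) : List String :=
  let st := sentences.foldl pvASent ([], [], [])
  (PySem.List.pyRange 0 (st.1.length : Int) 1).map (fun i =>
    let t := PySem.List.pyGetD st.1 i []
    PySem.List.pyGetD t 0 "" ++ " " ++ PySem.List.pyGetD t 1 "" ++ " " ++
      PySem.List.pyGetD t 2 "" ++ " " ++ PySem.Int.toStr (PySem.List.pyGetD st.2.2 i 0))

-- ===== PORT B =====
-- pass 1: (words, starts)
def pvBStep (st : List String × PySem.Set Int) (sentence : String) :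
    List String × PySem.Set Int :=
  let ws := PySem.Str.split₀ sentence
  let starts := if ws.isEmpty then st.2 else PySem.Set.add st.2 (st.1.length : Int)
  (st.1 ++ ws, starts)

def make_trigram_alt (sentences : List String) : List String :=
  let st := sentences.foldl pvBStep ([], PySem.Set.empty)
  let words := st.1
  let starts := st.2
  (PySem.List.enumerate
      ((words.zip (PySem.List.slice words (some 1) none)).zip
        (PySem.List.slice words (some 2) none))).map
    (fun p => p.2.1.1 ++ " " ++ p.2.1.2 ++ " " ++ p.2.2 ++ " " ++
      PySem.Int.toStr (if PySem.Set.contains starts (p.1 + 2) then 1 else 0))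

-- ===== PRECONDITION & SPEC =====
def Spec_make_trigram (sentences : List String) (out : List String) : Prop := out = make_trigram_alt sentences
instance (sentences : List String) (out : List String) : Decidable (Spec_make_trigram sentences out) := by unfold Spec_make_trigram; infer_instance

-- ===== CLAIM (what is proved, stated in full; the proofs are below) =====
def Claim_equal_make_trigram : Prop := ∀ (sentences : List String), Dom_make_trigram sentences → Spec_make_trigram sentences (make_trigram sentences)

-- ===== LEMMAS AND PROOFS =====

-- the flattened (token, is_first) stream, a proof-side abstraction of both programs
def pvFlat (sentences : List String) : List (String × Bool) :=
  sentences.flatMap (fun s =>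
    (PySem.List.enumerate (PySem.Str.split₀ s)).map (fun p => (p.2, p.1 == 0)))

-- the emitted (trigram, label) pairs, as a recursion over the flattened stream
def pvW (buf : List String) : List (String × Bool) → List (List String × Int)
  | [] => []
  | (t, f) :: rest =>
    let buf' := buf ++ [t]
    if buf'.length = 3 then (buf', if f then 1 else 0) :: pvW (buf'.drop 1) rest
    else pvW buf' rest

-- A's per-token step, phrased on (token, is_first) pairs
def pvAStep' (st : List (List String) × List String × List Int) (p : String × Bool) :
    List (List String) × List String × List Int :=
  let buf' := st.2.1 ++ [p.1]
  if buf'.length == 3 then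
    (st.1 ++ [buf'], buf'.drop 1, st.2.2 ++ [if p.2 then (1 : Int) else 0])
  else
    (st.1, buf', st.2.2)

lemma pvASent_eq (st : List (List String) × List String × List Int) (s : String) :
    pvASent st s =
      ((PySem.List.enumerate (PySem.Str.split₀ s)).map (fun p => (p.2, p.1 == 0))).foldl pvAStep' st := by
  simp only [pvASent, List.foldl_map]; rfl

lemma foldA_flat (sentences : List String)
    (st : List (List String) × List String × List Int) :
    sentences.foldl pvASent st = (pvFlat sentences).foldl pvAStep' st := by
  induction sentences generalizing st with
  | nil => simp [pvFlat]
  | cons s rest ih =>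
    simp only [List.foldl_cons, pvFlat, List.flatMap_cons, List.foldl_append, pvASent_eq]
    exact ih _

lemma foldA_zip (l : List (String × Bool))
    (st : List (List String) × List String × List Int)
    (h : st.1.length = st.2.2.length) :
    (l.foldl pvAStep' st).1.zip (l.foldl pvAStep' st).2.2 = st.1.zip st.2.2 ++ pvW st.2.1 l ∧
      (l.foldl pvAStep' st).1.length = (l.foldl pvAStep' st).2.2.length := by
  induction l generalizing st with
  | nil => simp [pvW, h]
  | cons p rest ih =>
    obtain ⟨t, f⟩ := p
    by_cases h3 : st.2.1.length = 2
    · have step : pvAStep' st (t, f) =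
        (st.1 ++ [st.2.1 ++ [t]], (st.2.1 ++ [t]).drop 1, st.2.2 ++ [if f then (1:Int) else 0]) := by
        simp [pvAStep', h3]
      have ih' := ih (st.1 ++ [st.2.1 ++ [t]], (st.2.1 ++ [t]).drop 1,
          st.2.2 ++ [if f then (1:Int) else 0]) (by simp [h])
      constructor
      · rw [List.foldl_cons, step, ih'.1]
        simp [pvW, h3, List.zip_append h]
      · rw [List.foldl_cons, step]; exact ih'.2
    · have step : pvAStep' st (t, f) = (st.1, st.2.1 ++ [t], st.2.2) := by
        simp [pvAStep', h3]
      have ih' := ih (st.1, st.2.1 ++ [t], st.2.2) h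
      constructor
      · rw [List.foldl_cons, step, ih'.1]
        simp [pvW, h3]
      · rw [List.foldl_cons, step]; exact ih'.2

-- closed form for pvW: windows of three consecutive tokens of the full token list
lemma pvW_spec (l : List (String × Bool)) (buf : List String) (h : buf.length ≤ 2) :
    pvW buf l = (List.range (buf.length + l.length - 2)).map (fun j =>
      ([(buf ++ l.map Prod.fst).getD j "", (buf ++ l.map Prod.fst).getD (j+1) "",
        (buf ++ l.map Prod.fst).getD (j+2) ""],
       if (l.getD (j + 2 - buf.length) ("", false)).2 then (1:Int) else 0)) := by
  induction l generalizing buf with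
  | nil =>
    have h0 : buf.length + 0 - 2 = 0 := by omega
    simp [pvW]; omega
  | cons p rest ih =>
    obtain ⟨t, f⟩ := p
    by_cases h2 : buf.length = 2
    · obtain ⟨b0, b1, rfl⟩ := List.length_eq_two.mp h2
      have hL : pvW [b0, b1] ((t, f) :: rest) =
          ([b0, b1, t], if f then (1:Int) else 0) :: pvW [b1, t] rest := by
        simp [pvW]
      rw [hL, ih [b1, t] (by simp)]
      rw [show [b0, b1].length + ((t, f) :: rest).length - 2 = rest.length + 1 by simp]
      rw [List.range_succ_eq_map]
      simp only [List.map_cons, List.map_map]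
      congr 1
      rw [show [b1, t].length + rest.length - 2 = rest.length by simp]
      apply List.map_congr_left
      intro j _
      simp [Function.comp, Nat.succ_eq_add_one]
    · have h1 : buf.length ≤ 1 := by omega
      have hL : pvW buf ((t, f) :: rest) = pvW (buf ++ [t]) rest := by
        simp [pvW, h2]
      rw [hL, ih (buf ++ [t]) (by simp; omega)]
      rw [show (buf ++ [t]).length + rest.length - 2 = buf.length + ((t, f) :: rest).length - 2 by
        simp; omega]
      apply List.map_congr_left
      intro j _
      have hT : buf ++ [t] ++ rest.map Prod.fst = buf ++ ((t, f) :: rest).map Prod.fst := by simp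
      have hidx : j + 2 - buf.length = (j + 2 - (buf ++ [t]).length) + 1 := by simp; omega
      rw [hT, hidx, List.getD_cons_succ]

-- B's pass 1, characterised against the flattened stream:
-- words are the flat tokens, and the starts set holds exactly the flat indices whose is_first flag is set
lemma foldB_spec (sentences : List String) (w : List String) (S : PySem.Set Int) :
    (sentences.foldl pvBStep (w, S)).1 = w ++ (pvFlat sentences).map Prod.fst ∧
    ∀ v : Int, (v ∈ (sentences.foldl pvBStep (w, S)).2 ↔ v ∈ S ∨
      ∃ n : Nat, n < (pvFlat sentences).length ∧
        ((pvFlat sentences).getD n ("", false)).2 = true ∧ v = (w.length : Int) + n) := by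
  induction sentences generalizing w S with
  | nil => simp [pvFlat]
  | cons s rest ih =>
    have hflat : pvFlat (s :: rest) =
        (PySem.List.enumerate (PySem.Str.split₀ s)).map (fun p => (p.2, p.1 == 0)) ++ pvFlat rest := by
      simp [pvFlat]
    set ws := PySem.Str.split₀ s with hws
    have hE : ((PySem.List.enumerate ws).map (fun p => (p.2, p.1 == 0))).map Prod.fst = ws := by
      simp [List.map_map]
      exact PySem.List.map_snd_enumerate ws 0
    have hElen : ((PySem.List.enumerate ws).map (fun p => (p.2, p.1 == 0))).length = ws.length := by
      simp [PySem.List.length_enumerate]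
    by_cases hempty : ws = []
    · have hstep : pvBStep (w, S) s = (w, S) := by
        simp [pvBStep, ← hws, hempty]
      rw [List.foldl_cons, hstep]
      obtain ⟨ih1, ih2⟩ := ih w S
      refine ⟨by rw [ih1, hflat]; simp [hempty], ?_⟩
      intro v
      rw [ih2 v, hflat]
      simp [hempty]
    · have hstep : pvBStep (w, S) s = (w ++ ws, PySem.Set.add S (w.length : Int)) := by
        simp [pvBStep, ← hws, hempty]
      rw [List.foldl_cons, hstep]
      obtain ⟨ih1, ih2⟩ := ih (w ++ ws) (PySem.Set.add S (w.length : Int))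
      constructor
      · rw [ih1, hflat]; simp [hE]
      · intro v
        rw [ih2 v, hflat]
        constructor
        · rintro (hv | ⟨n, hn, hf, rfl⟩)
          · rw [PySem.Set.mem_add] at hv
            rcases hv with hv | rfl
            · exact Or.inl hv
            · obtain ⟨a, t, hc⟩ := List.exists_cons_of_ne_nil hempty
              refine Or.inr ⟨0, ?_, ?_, by simp⟩
              · rw [hc]; simp
              · rw [hc]; simp [PySem.List.enumerate_cons]
          · refine Or.inr ⟨ws.length + n, by simp [hElen]; omega, ?_, by simp; push_cast; ring⟩
            rw [List.getD_append_right _ _ _ _ (by rw [hElen]; omega), hElen]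
            simpa using hf
        · rintro (hv | ⟨n, hn, hf, rfl⟩)
          · exact Or.inl (by rw [PySem.Set.mem_add]; exact Or.inl hv)
          · by_cases hlt : n < ws.length
            · -- inside this sentence: flag holds only at n = 0
              have hf0 : n = 0 := by
                rw [List.getD_append _ _ _ _ (by rw [hElen]; exact hlt)] at hf
                rw [List.getD_eq_getElem _ _ (by simpa [hElen] using hlt)] at hf
                simp only [List.getElem_map, PySem.List.getElem_enumerate] at hf
                simpa using hf
              subst hf0
              exact Or.inl (by rw [PySem.Set.mem_add]; simp)
            · refine Or.inr ⟨n - ws.length, by simp [hElen] at hn ⊢; omega, ?_, ?_⟩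
              · rw [List.getD_append_right _ _ _ _ (by rw [hElen]; omega)] at hf
                rw [hElen] at hf
                exact hf
              · simp; omega

-- ===== VERDICT (by name: the statement is the Claim_ definition above) =====
theorem make_trigram_spec : Claim_equal_make_trigram := by
  intro sentences _
  show make_trigram sentences = make_trigram_alt sentences
  -- A's side: closed form over pvFlat
  have hz := foldA_zip (pvFlat sentences) ([], [], []) (by simp)
  rw [← foldA_flat sentences ([], [], [])] at hz
  simp only [List.zip_nil_left, List.nil_append] at hz
  obtain ⟨hz1, hz2⟩ := hz
  set F := pvFlat sentences with hF
  set stA := sentences.foldl pvASent ([], [], []) with hstA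
  have hP : pvW [] F = (List.range (F.length - 2)).map (fun j =>
      ([(F.map Prod.fst).getD j "", (F.map Prod.fst).getD (j+1) "", (F.map Prod.fst).getD (j+2) ""],
       if (F.getD (j + 2) ("", false)).2 then (1:Int) else 0)) := by
    rw [pvW_spec _ [] (by simp)]
    simp only [List.nil_append, List.length_nil, Nat.zero_add, Nat.sub_zero]
    rfl
  have htri : stA.1 = (pvW [] F).map Prod.fst := by
    rw [← hz1]; exact (List.map_fst_zip (le_of_eq hz2)).symm
  have hlab : stA.2.2 = (pvW [] F).map Prod.snd := by
    rw [← hz1]; exact (List.map_snd_zip (le_of_eq hz2.symm)).symm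
  have hlen : stA.1.length = F.length - 2 := by rw [htri, hP]; simp
  have htn : (((F.length : Int) - 2)).toNat = F.length - 2 := by omega
  -- B's side
  obtain ⟨hw, hS⟩ := foldB_spec sentences [] PySem.Set.empty
  set stB := sentences.foldl pvBStep ([], PySem.Set.empty) with hstB
  simp only [List.nil_append, List.length_nil, Nat.cast_zero] at hw hS
  have hwlen : stB.1.length = F.length := by rw [hw]; simp [hF]
  simp only [make_trigram, make_trigram_alt, ← hstA, ← hstB]
  have hs1 : PySem.List.slice stB.1 (some 1) none = stB.1.drop 1 := by
    exact_mod_cast PySem.List.slice_from_natCast stB.1 1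
  have hs2 : PySem.List.slice stB.1 (some 2) none = stB.1.drop 2 := by
    exact_mod_cast PySem.List.slice_from_natCast stB.1 2
  rw [hs1, hs2]
  -- both sides are maps over equal-length index lists; compare elementwise
  apply List.ext_getElem
  · simp [PySem.List.length_pyRange_one, PySem.List.length_enumerate, hlen, hwlen]
    omega
  · intro k hk1 hk2
    simp only [List.getElem_map, PySem.List.getElem_pyRange_one, PySem.List.getElem_enumerate]
    have hkF : k < F.length - 2 := by
      simp [PySem.List.length_pyRange_one, hlen] at hk1; omega
    have hzl : k < ((stB.1.zip (stB.1.drop 1)).zip (stB.1.drop 2)).length := by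
      simp [hwlen]; omega
    have hget : ((stB.1.zip (stB.1.drop 1)).zip (stB.1.drop 2))[k]'hzl =
        ((stB.1[k]'(by omega ), stB.1[k+1]'(by simp [hwlen]; omega)), stB.1[k+2]'(by simp [hwlen]; omega)) := by
      simp [List.getElem_zip, List.getElem_drop, Nat.add_comm]
    rw [hget]
    have e2 : ((0:Int) + (k:Int)) = ((k : Nat) : Int) := by ring
    rw [e2, PySem.List.pyGetD_natCast, PySem.List.pyGetD_natCast]
    rw [htri, hlab, hP]
    simp only [List.map_map]
    rw [List.getD_eq_getElem _ _ (by simpa using hkF), List.getD_eq_getElem _ _ (by simpa using hkF)]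
    simp only [List.getElem_map, List.getElem_range, Function.comp]
    -- tokens agree
    have htok : ∀ j (hj : j < F.length), (F.map Prod.fst).getD j "" = stB.1[j]'(by omega) := by
      intro j hj
      rw [List.getD_eq_getElem _ _ (by simpa using hj)]
      exact (List.getElem_of_eq hw _).symm
    -- label agrees
    have hflag : (PySem.Set.contains stB.2 ((k:Int) + 2)) = (F.getD (k + 2) ("", false)).2 := by
      have hk2F : k + 2 < F.length := by omega
      by_cases hf : (F.getD (k + 2) ("", false)).2 = true
      · rw [hf, PySem.Set.contains_iff, hS]
        exact Or.inr ⟨k + 2, hk2F, hf, by push_cast; ring⟩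
      · simp only [Bool.not_eq_true] at hf
        rw [hf, Bool.eq_false_iff]
        intro hc
        rw [PySem.Set.contains_iff, hS] at hc
        rcases hc with hc | ⟨n, hn, hfn, he⟩
        · simp [PySem.Set.empty] at hc
        · have hne : n = k + 2 := by omega
          subst hne
          rw [hf] at hfn
          exact absurd hfn (by decide)
    rw [htok k (by omega), htok (k+1) (by omega), htok (k+2) (by omega), hflag]
    simp [PySem.List.pyGetD]
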